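-- pv_equiv track=rewrite | github.com/Drachiir/safety_mole | cogs/rank_roles.py | get_rank_name
-- ===== SOURCE A (Python) =====
-- def get_rank_name(elo):
--     ranks = {
--         2800: 'Legend',
--         2600: 'Grandmaster',
--         2400: 'SeniorMaster',
--         2200: 'Master',
--         2000: 'Expert',
--         1800: 'Diamond',
--         1600: 'Platinum',
--         1400: 'Gold',
--         1200: 'Silver',
--         1000: 'Bronze',
--     }
--     for threshold, rank in ranks.items():
--         if elo >= threshold:
--             return rank
--     return 'Unranked'
-- ===== SOURCE B (Python) =====
-- def get_rank_name(elo):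
--     ranks = ['Bronze', 'Silver', 'Gold', 'Platinum', 'Diamond',
--              'Expert', 'Master', 'SeniorMaster', 'Grandmaster', 'Legend']
--     idx = (elo - 1000) // 200
--     if idx < 0:
--         return 'Unranked'
--     return ranks[min(idx, 9)]
-- ===== Notes on version B (the rewrite author's own statement) =====
-- stated objective: simpler
-- what changed: Replaced the descending threshold-dictionary scan with a closed-form bucket index (floor-dividing the elo offset by the bucket width, clamped to the top rank) into an ascending rank list.
import Mathlib
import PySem

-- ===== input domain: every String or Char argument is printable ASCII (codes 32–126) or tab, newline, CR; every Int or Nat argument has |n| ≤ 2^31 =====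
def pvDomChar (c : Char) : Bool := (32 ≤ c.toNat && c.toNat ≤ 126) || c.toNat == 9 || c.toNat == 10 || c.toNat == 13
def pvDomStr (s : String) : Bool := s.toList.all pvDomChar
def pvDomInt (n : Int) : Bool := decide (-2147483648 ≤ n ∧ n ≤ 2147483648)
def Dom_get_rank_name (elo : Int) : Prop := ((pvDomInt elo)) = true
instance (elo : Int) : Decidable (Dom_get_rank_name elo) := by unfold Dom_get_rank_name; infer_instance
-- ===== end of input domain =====

-- B replaces A's descending threshold scan by a closed-form bucket index; objective: simpler.

-- ===== PORT A =====
-- the dict's items in insertion order, scanned for the first threshold ≤ elo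
def rankItems : List (Int × String) :=
  [(2800, "Legend"), (2600, "Grandmaster"), (2400, "SeniorMaster"), (2200, "Master"),
   (2000, "Expert"), (1800, "Diamond"), (1600, "Platinum"), (1400, "Gold"),
   (1200, "Silver"), (1000, "Bronze")]

def rankScan (elo : Int) : List (Int × String) → String
  | [] => "Unranked"
  | (threshold, rank) :: rest => if elo ≥ threshold then rank else rankScan elo rest

def get_rank_name (elo : Int) : String := rankScan elo rankItems

-- ===== PORT B =====
def ranksAsc : List String :=
  ["Bronze", "Silver", "Gold", "Platinum", "Diamond",
   "Expert", "Master", "SeniorMaster", "Grandmaster", "Legend"]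

def get_rank_name_alt (elo : Int) : String :=
  if PySem.Int.floordiv (elo - 1000) 200 < 0 then "Unranked"
  else PySem.List.pyGetD ranksAsc (min (PySem.Int.floordiv (elo - 1000) 200) 9) "Unranked"

-- ===== PRECONDITION & SPEC =====
def Spec_get_rank_name (elo : Int) (out : String) : Prop := out = get_rank_name_alt elo
instance (elo : Int) (out : String) : Decidable (Spec_get_rank_name elo out) := by unfold Spec_get_rank_name; infer_instance

-- ===== CLAIM (what is proved, stated in full; the proofs are below) =====
def Claim_equal_get_rank_name : Prop := ∀ (elo : Int), Dom_get_rank_name elo → Spec_get_rank_name elo (get_rank_name elo)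

-- ===== LEMMAS AND PROOFS =====

theorem idx_eq (elo q : Int) (h1 : q * 200 ≤ elo - 1000) (h2 : elo - 1000 < (q + 1) * 200) :
    PySem.Int.floordiv (elo - 1000) 200 = q :=
  (PySem.Int.floordiv_eq_iff_of_pos (by omega)).mpr ⟨h1, h2⟩

-- ===== VERDICT (by name: the statement is the Claim_ definition above) =====
set_option maxHeartbeats 1000000 in
theorem get_rank_name_spec : Claim_equal_get_rank_name := by
  intro elo hdom
  unfold Spec_get_rank_name get_rank_name_alt
  by_cases h0 : elo < 1000
  · have hq : PySem.Int.floordiv (elo - 1000) 200 < 0 := by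
      rw [PySem.Int.floordiv_lt_iff_lt_mul (by omega : (0:Int) < 200)]; omega
    rw [if_pos hq]
    simp only [get_rank_name, rankScan, rankItems]
    split_ifs <;> first | rfl | omega
  · by_cases h9 : 2800 ≤ elo
    · have hge : (9:Int) ≤ PySem.Int.floordiv (elo - 1000) 200 := by
        rw [PySem.Int.le_floordiv_iff_mul_le (by omega : (0:Int) < 200)]; omega
      rw [if_neg (by omega), min_eq_right hge]
      simp only [get_rank_name, rankScan, rankItems]
      split_ifs <;> rfl
    · -- 1000 ≤ elo < 2800: descend through the nine remaining buckets
      by_cases h8 : 2600 ≤ elo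
      · rw [idx_eq elo 8 (by omega) (by omega), if_neg (by omega), min_eq_left (by omega)]
        simp only [get_rank_name, rankScan, rankItems]
        split_ifs <;> first | omega | rfl
      by_cases h7 : 2400 ≤ elo
      · rw [idx_eq elo 7 (by omega) (by omega), if_neg (by omega), min_eq_left (by omega)]
        simp only [get_rank_name, rankScan, rankItems]
        split_ifs <;> first | omega | rfl
      by_cases h6 : 2200 ≤ elo
      · rw [idx_eq elo 6 (by omega) (by omega), if_neg (by omega), min_eq_left (by omega)]
        simp only [get_rank_name, rankScan, rankItems]
        split_ifs <;> first | omega | rfl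
      by_cases h5 : 2000 ≤ elo
      · rw [idx_eq elo 5 (by omega) (by omega), if_neg (by omega), min_eq_left (by omega)]
        simp only [get_rank_name, rankScan, rankItems]
        split_ifs <;> first | omega | rfl
      by_cases h4 : 1800 ≤ elo
      · rw [idx_eq elo 4 (by omega) (by omega), if_neg (by omega), min_eq_left (by omega)]
        simp only [get_rank_name, rankScan, rankItems]
        split_ifs <;> first | omega | rfl
      by_cases h3 : 1600 ≤ elo
      · rw [idx_eq elo 3 (by omega) (by omega), if_neg (by omega), min_eq_left (by omega)]
        simp only [get_rank_name, rankScan, rankItems]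
        split_ifs <;> first | omega | rfl
      by_cases h2 : 1400 ≤ elo
      · rw [idx_eq elo 2 (by omega) (by omega), if_neg (by omega), min_eq_left (by omega)]
        simp only [get_rank_name, rankScan, rankItems]
        split_ifs <;> first | omega | rfl
      by_cases h1 : 1200 ≤ elo
      · rw [idx_eq elo 1 (by omega) (by omega), if_neg (by omega), min_eq_left (by omega)]
        simp only [get_rank_name, rankScan, rankItems]
        split_ifs <;> first | omega | rfl
      rw [idx_eq elo 0 (by omega) (by omega), if_neg (by omega), min_eq_left (by omega)]
      simp only [get_rank_name, rankScan, rankItems]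
      split_ifs <;> first | omega | rfl
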